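-- pv_equiv track=rewrite | github.com/Blue-Kite/algorithm | 프로그래머스100제/모의고사.py | solution
-- ===== SOURCE A (Python) =====
-- def solution(answers):
--     answer = []
--     pattern = [
--         [1,2,3,4,5],
--         [2,1,2,3,2,4,2,5],
--         [3,3,1,1,2,2,4,4,5,5]
--     ]
--     score = [0] * 3
--
--     for i, a in enumerate(answers):
--         for j, p in enumerate(pattern):
--             if a == p[i % len(p)]:
--                 score[j] += 1
--
--     maxscore = max(score)
--
--     for i, s in enumerate(score):
--         if s == maxscore:
--             answer.append(i+1)
--     return answer
-- ===== SOURCE B (Python) =====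
-- def solution(answers):
--     # Aggregate-then-score: one pass builds a histogram of (phase mod 40, answer)
--     # pairs (40 = lcm of the pattern lengths), then each pattern's score is read
--     # off the histogram through its 40-entry phase table -- no per-answer pattern
--     # comparisons at all.
--     pats = [
--         [1, 2, 3, 4, 5],
--         [2, 1, 2, 3, 2, 4, 2, 5],
--         [3, 3, 1, 1, 2, 2, 4, 4, 5, 5],
--     ]
--     hist = {}
--     for i, a in enumerate(answers):
--         key = (i % 40, a)
--         hist[key] = hist.get(key, 0) + 1
--     tables = [[p[ph % len(p)] for ph in range(40)] for p in pats]
--     scores = [sum(hist.get((ph, t[ph]), 0) for ph in range(40)) for t in tables]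
--     m = max(scores)
--     return [j + 1 for j, s in enumerate(scores) if s == m]
-- ===== Notes on version B (the rewrite author's own statement) =====
-- stated objective: alternative
-- what changed: Replaces A's fused per-answer/per-pattern matching loop with an aggregate-then-score algorithm: one pass builds a histogram keyed by (index mod 40, answer) (40 = lcm of the pattern lengths), and each pattern's score is then read off the histogram through its 40-entry phase table, with no per-answer pattern comparisons.
import Mathlib
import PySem

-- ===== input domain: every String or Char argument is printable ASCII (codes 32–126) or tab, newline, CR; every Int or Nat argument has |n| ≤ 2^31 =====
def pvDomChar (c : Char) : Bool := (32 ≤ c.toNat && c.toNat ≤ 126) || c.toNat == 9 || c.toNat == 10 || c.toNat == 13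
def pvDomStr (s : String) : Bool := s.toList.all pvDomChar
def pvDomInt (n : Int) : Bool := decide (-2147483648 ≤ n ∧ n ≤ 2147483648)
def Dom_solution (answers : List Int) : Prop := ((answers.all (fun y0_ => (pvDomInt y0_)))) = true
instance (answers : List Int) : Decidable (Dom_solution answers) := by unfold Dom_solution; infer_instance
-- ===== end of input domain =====

-- B replaces A's fused matching loop with aggregate-then-score: a histogram keyed by
-- (index mod 40, answer) built in one pass, scored through 40-entry phase tables.

-- ===== PORT A =====
def pvPatternsA : List (List Int) :=
  [[1,2,3,4,5], [2,1,2,3,2,4,2,5], [3,3,1,1,2,2,4,4,5,5]]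

-- the body of A's outer loop: Python's inner 'for j, p in enumerate(pattern)' loop
-- p[i % len(p)] is always in range and i ≥ 0, j ∈ {0,1,2}: pyGetD / modify j.toNat are exact here
def pvScoreStep (score : List Int) (ia : Int × Int) : List Int :=
  (PySem.List.enumerate pvPatternsA 0).foldl (fun score jp =>
    if ia.2 = PySem.List.pyGetD jp.2 (PySem.Int.mod ia.1 jp.2.length) 0
    then score.modify jp.1.toNat (fun s => s + 1) else score) score

def solution (answers : List Int) : List Int :=
  let score := (PySem.List.enumerate answers 0).foldl pvScoreStep [0, 0, 0]
  let maxscore := (PySem.List.max? score (fun y => y)).getD 0   -- score has length 3, so max? is some: exact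
  (PySem.List.enumerate score 0).foldl (fun ans is =>
    if is.2 = maxscore then ans ++ [is.1 + 1] else ans) []

-- ===== PORT B =====
def pvPatternsB : List (List Int) :=
  [[1,2,3,4,5], [2,1,2,3,2,4,2,5], [3,3,1,1,2,2,4,4,5,5]]

-- the histogram loop: hist[(i % 40, a)] = hist.get((i % 40, a), 0) + 1
def pvHist (answers : List Int) : PySem.Dict (Int × Int) Int :=
  (PySem.List.enumerate answers 0).foldl
    (fun d ia => d.insert (PySem.Int.mod ia.1 40, ia.2) (d.getD (PySem.Int.mod ia.1 40, ia.2) 0 + 1))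
    PySem.Dict.empty

-- one pattern's 40-entry phase table: [p[ph % len(p)] for ph in range(40)]
def pvTable (pat : List Int) : List Int :=
  (PySem.List.pyRange 0 40 1).map (fun ph => PySem.List.pyGetD pat (PySem.Int.mod ph (pat.length : Int)) 0)

def solution_alt (answers : List Int) : List Int :=
  let hist := pvHist answers
  let scores := pvPatternsB.map (fun p =>
    ((PySem.List.pyRange 0 40 1).map
        (fun ph => hist.getD (ph, PySem.List.pyGetD (pvTable p) ph 0) 0)).sum)
  let m := (PySem.List.max? scores (fun y => y)).getD 0   -- scores has length 3: exact
  (PySem.List.enumerate scores 0).foldl (fun ans js =>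
    if js.2 = m then ans ++ [js.1 + 1] else ans) []

-- ===== PRECONDITION & SPEC =====
def Spec_solution (answers : List Int) (out : List Int) : Prop := out = solution_alt answers
instance (answers : List Int) (out : List Int) : Decidable (Spec_solution answers out) := by unfold Spec_solution; infer_instance

-- ===== CLAIM =====
def Claim_equal_solution : Prop := ∀ (answers : List Int), Dom_solution answers → Spec_solution answers (solution answers)

-- ===== LEMMAS AND PROOFS =====

-- number of positions where a cyclic walk of pat (starting at offset i) matches the answers
def cnt (pat : List Int) : Nat → List Int → Int
  | _, [] => 0
  | i, a :: l => (if a = pat.getD (i % pat.length) 0 then 1 else 0) + cnt pat (i + 1) l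

-- ---------- A-side: the fused loop computes cnt for each pattern ----------

theorem stepA (a k s1 s2 s3 : Int) :
    pvScoreStep [s1, s2, s3] (k, a)
      = [s1 + (if a = PySem.List.pyGetD [1,2,3,4,5] (PySem.Int.mod k (((5:Nat)):Int)) 0 then 1 else 0),
         s2 + (if a = PySem.List.pyGetD [2,1,2,3,2,4,2,5] (PySem.Int.mod k (((8:Nat)):Int)) 0 then 1 else 0),
         s3 + (if a = PySem.List.pyGetD [3,3,1,1,2,2,4,4,5,5] (PySem.Int.mod k (((10:Nat)):Int)) 0 then 1 else 0)] := by
  simp only [pvScoreStep, pvPatternsA, PySem.List.enumerate_cons, PySem.List.enumerate_nil,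
    List.foldl_cons, List.foldl_nil, List.length_cons, List.length_nil]
  norm_num
  split_ifs <;> simp [List.modify]

theorem scoreA_loop (l : List Int) :
    ∀ (i : Nat) (s1 s2 s3 : Int),
      (PySem.List.enumerate l (i : Int)).foldl pvScoreStep [s1, s2, s3]
      = [s1 + cnt [1,2,3,4,5] i l,
         s2 + cnt [2,1,2,3,2,4,2,5] i l,
         s3 + cnt [3,3,1,1,2,2,4,4,5,5] i l] := by
  induction l with
  | nil => intro i s1 s2 s3; simp [PySem.List.enumerate_nil, cnt]
  | cons a l ih =>
    intro i s1 s2 s3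
    rw [PySem.List.enumerate_cons, List.foldl_cons]
    have hstep := stepA a (i : Int) s1 s2 s3
    simp only [] at hstep ⊢
    rw [hstep]
    rw [show ((i : Int) + 1) = ((i + 1 : Nat) : Int) by push_cast; ring]
    rw [ih (i + 1)]
    simp only [cnt, PySem.Int.mod_natCast, PySem.List.pyGetD_natCast,
      List.length_cons, List.length_nil, List.cons.injEq, and_true]
    norm_num
    refine ⟨by ring, by ring, by ring⟩

theorem scoreA_zero (answers : List Int) :
    (PySem.List.enumerate answers 0).foldl pvScoreStep [0, 0, 0]
      = [cnt [1,2,3,4,5] 0 answers,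
         cnt [2,1,2,3,2,4,2,5] 0 answers,
         cnt [3,3,1,1,2,2,4,4,5,5] 0 answers] := by
  have h := scoreA_loop answers 0 0 0 0
  simpa using h

-- ---------- B-side: the histogram score is cnt as well ----------

theorem pvHist_eq_counter (answers : List Int) :
    pvHist answers
      = PySem.Dict.counter
          ((PySem.List.enumerate answers 0).map (fun ia => (PySem.Int.mod ia.1 40, ia.2))) := by
  rw [← PySem.Dict.foldl_insert_getD_add_one_eq_counter, List.foldl_map]
  rfl

theorem sum_ite_zero (v c : Int) (f : Int → Int) (xs : List Int) (h : ∀ ph ∈ xs, ph ≠ c) :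
    (xs.map (fun ph => if ((ph, f ph) : Int × Int) = (c, v) then (1:Int) else 0)).sum = 0 := by
  apply List.sum_eq_zero
  intro x hx
  obtain ⟨ph, hm, rfl⟩ := List.mem_map.1 hx
  simp [Prod.ext_iff, h ph hm]

theorem sum_ite_single (v : Int) (f : Int → Int) {a b c : Int} (hac : a ≤ c) (hcb : c < b) :
    ((PySem.List.pyRange a b 1).map
        (fun ph => if ((ph, f ph) : Int × Int) = (c, v) then (1:Int) else 0)).sum
      = if v = f c then 1 else 0 := by
  rw [PySem.List.pyRange_one_append a c b hac (le_of_lt hcb),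
      PySem.List.pyRange_one_cons hcb]
  rw [List.map_append, List.sum_append, List.map_cons, List.sum_cons]
  rw [sum_ite_zero v c f _ (fun ph hm => by have := (PySem.List.mem_pyRange_one.1 hm).2; omega)]
  rw [sum_ite_zero v c f _ (fun ph hm => by have := (PySem.List.mem_pyRange_one.1 hm).1; omega)]
  simp [Prod.ext_iff, eq_comm]

-- summing the histogram row over all 40 phases counts the matching keys one by one
theorem sum_count_key (f : Int → Int) :
    ∀ (ks : List (Int × Int)), (∀ k ∈ ks, 0 ≤ k.1 ∧ k.1 < 40) →
      ((PySem.List.pyRange 0 40 1).map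
          (fun ph => ((ks.count ((ph, f ph) : Int × Int) : Nat) : Int))).sum
        = (ks.map (fun k => if k.2 = f k.1 then (1:Int) else 0)).sum := by
  intro ks
  induction ks with
  | nil => intro _; simp
  | cons k ks ih =>
    intro hb
    have hmap :
        (PySem.List.pyRange 0 40 1).map
            (fun ph => (((k :: ks).count ((ph, f ph) : Int × Int) : Nat) : Int))
          = (PySem.List.pyRange 0 40 1).map
              (fun ph => ((ks.count ((ph, f ph) : Int × Int) : Nat) : Int)
                + if ((ph, f ph) : Int × Int) = k then (1:Int) else 0) := by
      apply List.map_congr_left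
      intro ph _
      rw [List.count_cons]
      push_cast
      congr 1
      simp only [beq_iff_eq]
      exact if_congr ⟨Eq.symm, Eq.symm⟩ rfl rfl
    rw [hmap, PySem.List.sum_map_add_int,
        ih (fun x hx => hb x (List.mem_cons_of_mem k hx))]
    have hk := hb k List.mem_cons_self
    rw [show k = ((k.1, k.2) : Int × Int) from rfl] at *
    rw [sum_ite_single k.2 f hk.1 hk.2]
    rw [List.map_cons, List.sum_cons]
    ring

theorem table_entry (pat : List Int) (hd : pat.length ∣ 40) (n : Nat) :
    PySem.List.pyGetD (pvTable pat) (((n % 40 : Nat) : Int)) 0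
      = pat.getD (n % pat.length) 0 := by
  unfold pvTable
  have h40 : (40 : Int) = ((40 : Nat) : Int) := by norm_num
  rw [h40, PySem.List.pyGetD_map_pyRange _ 40 (n % 40) 0 (Nat.mod_lt n (by omega))]
  have hm : PySem.Int.mod (((n % 40 : Nat)) : Int) ((pat.length : Nat) : Int)
      = (((n % 40) % pat.length : Nat) : Int) := PySem.Int.mod_natCast _ _
  rw [hm, PySem.List.pyGetD_natCast, Nat.mod_mod_of_dvd n hd]

-- the per-key 0/1 sum over the phase table is the cyclic match count cnt
theorem sum_match (pat : List Int) (hd : pat.length ∣ 40) :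
    ∀ (l : List Int) (n : Nat),
      (((PySem.List.enumerate l (n : Int)).map (fun ia => (PySem.Int.mod ia.1 40, ia.2))).map
          (fun k => if k.2 = PySem.List.pyGetD (pvTable pat) k.1 0 then (1:Int) else 0)).sum
        = cnt pat n l := by
  intro l
  induction l with
  | nil => intro n; simp [PySem.List.enumerate_nil, cnt]
  | cons a l ih =>
    intro n
    rw [PySem.List.enumerate_cons, List.map_cons, List.map_cons, List.sum_cons]
    have hkey : PySem.Int.mod ((n : Int)) 40 = (((n % 40 : Nat)) : Int) := by
      exact_mod_cast PySem.Int.mod_natCast n 40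
    rw [show ((n : Int) + 1) = ((n + 1 : Nat) : Int) by push_cast; ring, ih (n + 1)]
    simp only [hkey, table_entry pat hd n, cnt]

theorem keys_bounded (l : List Int) (s : Int) :
    ∀ k ∈ (PySem.List.enumerate l s).map (fun ia => (PySem.Int.mod ia.1 40, ia.2)),
      0 ≤ k.1 ∧ k.1 < 40 := by
  intro k hk
  obtain ⟨ia, _, rfl⟩ := List.mem_map.1 hk
  exact ⟨PySem.Int.mod_nonneg _ (by norm_num), PySem.Int.mod_lt _ (by norm_num)⟩

theorem scoreB_eq (pat : List Int) (hd : pat.length ∣ 40)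
    (answers : List Int) :
    ((PySem.List.pyRange 0 40 1).map
        (fun ph => (pvHist answers).getD (ph, PySem.List.pyGetD (pvTable pat) ph 0) 0)).sum
      = cnt pat 0 answers := by
  rw [pvHist_eq_counter]
  simp only [PySem.Dict.getD_counter]
  rw [sum_count_key (fun ph => PySem.List.pyGetD (pvTable pat) ph 0) _
        (keys_bounded answers 0)]
  have h := sum_match pat hd answers 0
  simpa using h

theorem solution_eq_alt (answers : List Int) :
    solution answers = solution_alt answers := by
  have h1 := scoreB_eq [1,2,3,4,5] (by norm_num) answers
  have h2 := scoreB_eq [2,1,2,3,2,4,2,5] (by norm_num) answers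
  have h3 := scoreB_eq [3,3,1,1,2,2,4,4,5,5] (by norm_num) answers
  simp only [solution, solution_alt, pvPatternsB, List.map_cons, List.map_nil,
    scoreA_zero, h1, h2, h3]

-- ===== VERDICT =====
theorem solution_spec : Claim_equal_solution := by
  intro answers _
  unfold Spec_solution
  exact solution_eq_alt answers
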